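-- pv_equiv track=rewrite | github.com/JohannesSetiawan/listing-components | src/pages/api_client.py | is_html_content
-- ===== SOURCE A (Python) =====
-- def is_html_content(body, content_type):
--     """
--     Detect if the response body is HTML content.
--     """
--     # Check content type header
--     if "text/html" in content_type or "application/xhtml" in content_type:
--         return True
--
--     # Check for HTML indicators in the body
--     body_lower = body.strip().lower()
--     html_indicators = [
--         '<!doctype html',
--         '<html',
--         '<head',
--         '<body',
--         '<div',
--         '<span',
--         '<p>',
--         '<h1',
--         '<h2',
--         '<h3',
--         '<script',
--         '<style',
--         '<meta',
--         '<link',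
--         '<title'
--     ]
--
--     return any(indicator in body_lower for indicator in html_indicators)
-- ===== SOURCE B (Python) =====
-- _INDICATOR_TAILS = (
--     '!doctype html', 'html', 'head', 'body', 'div', 'span', 'p>',
--     'h1', 'h2', 'h3', 'script', 'style', 'meta', 'link', 'title',
-- )
--
-- def is_html_content(body, content_type):
--     """Detect if the response body is HTML content (single scan for '<')."""
--     if "text/html" in content_type or "application/xhtml" in content_type:
--         return True
--     s = body.strip().lower()
--     for i in range(len(s)):
--         if s[i] == '<' and s.startswith(_INDICATOR_TAILS, i + 1):
--             return True
--     return False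
-- ===== Notes on version B (the rewrite author's own statement) =====
-- stated objective: alternative
-- what changed: Replaces the 15-way short-circuit scan (one full substring search per indicator) by a single left-to-right pass over the body that, at each '<' character, checks the indicator tails via one tuple-startswith call; the content-type guard is unchanged.
import Mathlib
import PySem

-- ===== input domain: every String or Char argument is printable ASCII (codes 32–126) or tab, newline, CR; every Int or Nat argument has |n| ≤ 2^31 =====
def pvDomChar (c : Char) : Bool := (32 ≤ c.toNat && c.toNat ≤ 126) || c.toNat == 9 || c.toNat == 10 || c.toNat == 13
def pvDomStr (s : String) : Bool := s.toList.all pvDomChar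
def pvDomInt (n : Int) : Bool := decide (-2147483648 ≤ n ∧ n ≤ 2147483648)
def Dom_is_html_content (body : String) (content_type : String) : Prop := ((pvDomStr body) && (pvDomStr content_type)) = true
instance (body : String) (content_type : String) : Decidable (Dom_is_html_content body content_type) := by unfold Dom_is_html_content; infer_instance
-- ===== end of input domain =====

-- B replaces A's per-indicator substring searches by one left-to-right scan checking indicator tails at each '<' (alternative decomposition, same result).

-- ===== PORT A =====
def pvHtmlIndicators : List String :=
  ["<!doctype html", "<html", "<head", "<body", "<div", "<span", "<p>",
   "<h1", "<h2", "<h3", "<script", "<style", "<meta", "<link", "<title"]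

def is_html_content (body : String) (content_type : String) : Bool :=
  if PySem.Str.isIn "text/html" content_type || PySem.Str.isIn "application/xhtml" content_type then
    true
  else
    let body_lower := PySem.Str.lower (PySem.Str.strip body)
    pvHtmlIndicators.any (fun indicator => PySem.Str.isIn indicator body_lower)

-- ===== PORT B =====
def pvIndicatorTails : List String :=
  ["!doctype html", "html", "head", "body", "div", "span", "p>",
   "h1", "h2", "h3", "script", "style", "meta", "link", "title"]

-- the loop 'for i in range(len(s)): if s[i] == '<' and s.startswith(tails, i+1): return True'
def pvScanB (inds : List String) : List Char → Bool
  | [] => false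
  | c :: rest =>
      (c == '<' && inds.any (fun p => PySem.Chars.startswith rest p.toList)) || pvScanB inds rest

def is_html_content_alt (body : String) (content_type : String) : Bool :=
  if PySem.Str.isIn "text/html" content_type || PySem.Str.isIn "application/xhtml" content_type then
    true
  else
    pvScanB pvIndicatorTails (PySem.Chars.lower (PySem.Chars.strip body.toList))

-- ===== PRECONDITION & SPEC =====
def Spec_is_html_content (body : String) (content_type : String) (out : Bool) : Prop := out = is_html_content_alt body content_type
instance (body : String) (content_type : String) (out : Bool) : Decidable (Spec_is_html_content body content_type out) := by unfold Spec_is_html_content; infer_instance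

-- ===== CLAIM (what is proved, stated in full; the proofs are below) =====
def Claim_equal_is_html_content : Prop := ∀ (body : String) (content_type : String), Dom_is_html_content body content_type → Spec_is_html_content body content_type (is_html_content body content_type)

-- ===== LEMMAS AND PROOFS =====

lemma pvScanB_iff (inds : List String) (cs : List Char) :
    pvScanB inds cs = true ↔ ∃ p ∈ inds, ('<' :: p.toList) <:+: cs := by
  induction cs with
  | nil => simp [pvScanB]
  | cons c rest ih =>
      simp only [pvScanB, Bool.or_eq_true, Bool.and_eq_true, List.any_eq_true, beq_iff_eq, ih]
      constructor
      · rintro (⟨rfl, p, hp, hpre⟩ | ⟨p, hp, hinf⟩)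
        · refine ⟨p, hp, (List.cons_prefix_cons.mpr ⟨rfl, ?_⟩).isInfix⟩
          simpa [PySem.Chars.startswith_iff] using hpre
        · exact ⟨p, hp, hinf.trans (List.suffix_cons c rest).isInfix⟩
      · rintro ⟨p, hp, hinf⟩
        rcases List.infix_cons_iff.mp hinf with hpre | hinf'
        · obtain ⟨rfl, h'⟩ := List.cons_prefix_cons.mp hpre
          exact Or.inl ⟨rfl, p, hp, by simpa [PySem.Chars.startswith_iff] using h'⟩
        · exact Or.inr ⟨p, hp, hinf'⟩

lemma pvBody_part (cs : List Char) :
    pvHtmlIndicators.any (fun indicator => PySem.Chars.isIn indicator.toList cs)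
      = pvScanB pvIndicatorTails cs := by
  rw [Bool.eq_iff_iff, pvScanB_iff]
  have hmap : pvHtmlIndicators.map String.toList
      = pvIndicatorTails.map (fun p => '<' :: p.toList) := by decide
  constructor
  · intro h
    obtain ⟨ind, hind, hin⟩ := List.any_eq_true.mp h
    have hm : ind.toList ∈ pvIndicatorTails.map (fun p => '<' :: p.toList) :=
      hmap ▸ List.mem_map_of_mem hind
    obtain ⟨p, hp, he⟩ := List.mem_map.mp hm
    exact ⟨p, hp, he ▸ (PySem.Chars.isIn_iff_infix _ _).mp hin⟩
  · rintro ⟨p, hp, hinf⟩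
    have hm : ('<' :: p.toList) ∈ pvHtmlIndicators.map String.toList :=
      hmap.symm ▸ List.mem_map_of_mem hp
    obtain ⟨ind, hind, he⟩ := List.mem_map.mp hm
    exact List.any_eq_true.mpr ⟨ind, hind, (PySem.Chars.isIn_iff_infix _ _).mpr (he ▸ hinf)⟩

-- ===== VERDICT (by name: the statement is the Claim_ definition above) =====
theorem is_html_content_spec : Claim_equal_is_html_content := by
  intro body content_type _
  unfold Spec_is_html_content is_html_content is_html_content_alt
  split_ifs with h
  · rfl
  · have := pvBody_part ((PySem.Str.lower (PySem.Str.strip body)).toList)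
    simpa [PySem.Str.isIn] using this
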